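-- pv_equiv track=rewrite | github.com/hokunpark98/ICSOC2024 | repackaging_local/dag/DAG.py | filter_and_sort_paths
-- ===== SOURCE A (Python) =====
-- def filter_and_sort_paths(all_paths_with_durations):
--     def is_sub_path(path, other_path):
--         if len(path) >= len(other_path):
--             return False
--         for i in range(len(other_path) - len(path) + 1):
--             if other_path[i:i + len(path)] == path:
--                 return True
--         return False
--
--     filtered_paths = []
--     paths_list = [path for path, duration in all_paths_with_durations]
--
--     for path, duration in all_paths_with_durations:
--         if not any(is_sub_path(path, other_path) for other_path in paths_list if path != other_path):
--             filtered_paths.append((path, duration))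
--
--     filtered_paths.sort(key=lambda x: x[1], reverse=True)
--
--     return filtered_paths
-- ===== SOURCE B (Python) =====
-- def filter_and_sort_paths(all_paths_with_durations):
--     # One window-hash set per distinct path length: a path survives iff it is
--     # not a window (contiguous subpath) of its own length inside a longer path.
--     paths = [tuple(p) for p, _ in all_paths_with_durations]
--
--     def windows(m):
--         s = set()
--         for t in paths:
--             if len(t) > m:
--                 for i in range(len(t) - m + 1):
--                     s.add(t[i:i + m])
--         return s
--
--     subs = {m: windows(m) for m in {len(t) for t in paths}}
--     kept = [(p, d) for p, d in all_paths_with_durations if tuple(p) not in subs[len(p)]]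
--     return sorted(kept, key=lambda x: x[1], reverse=True)
-- ===== Notes on version B (the rewrite author's own statement) =====
-- stated objective: faster
-- what changed: Instead of testing every path against every other path with a quadratic sliding-window scan, B builds one hash set per distinct path length holding all windows of that length taken from strictly longer paths, and keeps a path iff a single set lookup misses.
import Mathlib
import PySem

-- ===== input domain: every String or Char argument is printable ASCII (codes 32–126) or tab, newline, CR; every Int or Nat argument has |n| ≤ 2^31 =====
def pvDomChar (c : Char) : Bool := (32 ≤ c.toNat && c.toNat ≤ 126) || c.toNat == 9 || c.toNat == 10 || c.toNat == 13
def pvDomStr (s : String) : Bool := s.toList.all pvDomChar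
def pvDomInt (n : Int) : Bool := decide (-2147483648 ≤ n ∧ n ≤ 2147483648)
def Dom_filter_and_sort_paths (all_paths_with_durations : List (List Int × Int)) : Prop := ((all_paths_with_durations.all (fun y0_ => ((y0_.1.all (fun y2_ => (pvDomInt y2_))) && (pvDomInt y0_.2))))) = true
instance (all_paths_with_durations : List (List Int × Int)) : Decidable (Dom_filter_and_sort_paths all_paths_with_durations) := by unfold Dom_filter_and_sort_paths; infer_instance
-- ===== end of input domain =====

-- B replaces A's all-pairs sliding-window scan by one hash set per distinct path
-- length (windows of that length in strictly longer paths), looked up once per path.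

-- ===== PORT A =====
-- inner helper is_sub_path(path, other_path)
def pvIsSubPath (path other_path : List Int) : Bool :=
  if other_path.length ≤ path.length then false
  else
    (PySem.List.pyRange 0 ((other_path.length : Int) - (path.length : Int) + 1) 1).any
      (fun i => PySem.List.slice other_path (some i) (some (i + (path.length : Int))) == path)

def filter_and_sort_paths (all_paths_with_durations : List (List Int × Int)) : List (List Int × Int) :=
  let paths_list := all_paths_with_durations.map (fun pd => pd.1)
  let filtered_paths := all_paths_with_durations.foldl
    (fun acc pd =>
      if !(paths_list.any (fun other_path =>
            decide (pd.1 ≠ other_path) && pvIsSubPath pd.1 other_path))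
      then acc ++ [pd] else acc) []
  PySem.List.sorted filtered_paths (fun x => x.2) true

-- ===== PORT B =====
-- helper windows(m): every length-m window of each path longer than m
def pvWindows (paths : List (List Int)) (m : Int) : PySem.Set (List Int) :=
  paths.foldl
    (fun s t =>
      if m < (t.length : Int) then
        (PySem.List.pyRange 0 ((t.length : Int) - m + 1) 1).foldl
          (fun s i => PySem.Set.add s (PySem.List.slice t (some i) (some (i + m)))) s
      else s)
    PySem.Set.empty

def filter_and_sort_paths_alt (all_paths_with_durations : List (List Int × Int)) : List (List Int × Int) :=
  let paths := all_paths_with_durations.map (fun pd => pd.1)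
  -- {m: windows(m) for m in {len(t) for t in paths}}; the dict is only looked up, so
  -- the set's (hash) iteration order cannot influence the result
  let subs : PySem.Dict Int (PySem.Set (List Int)) :=
    (PySem.Set.ofList (paths.map (fun t => (t.length : Int)))).foldl
      (fun d m => d.insert m (pvWindows paths m)) PySem.Dict.empty
  let kept := all_paths_with_durations.filter
    (fun pd => !(PySem.Set.contains (subs.getD (pd.1.length : Int) PySem.Set.empty) pd.1))
  PySem.List.sorted kept (fun x => x.2) true

-- ===== PRECONDITION & SPEC =====
def Spec_filter_and_sort_paths (all_paths_with_durations : List (List Int × Int)) (out : List (List Int × Int)) : Prop := out = filter_and_sort_paths_alt all_paths_with_durations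
instance (all_paths_with_durations : List (List Int × Int)) (out : List (List Int × Int)) : Decidable (Spec_filter_and_sort_paths all_paths_with_durations out) := by unfold Spec_filter_and_sort_paths; infer_instance

-- ===== CLAIM (what is proved, stated in full; the proofs are below) =====
def Claim_equal_filter_and_sort_paths : Prop := ∀ (all_paths_with_durations : List (List Int × Int)), Dom_filter_and_sort_paths all_paths_with_durations → Spec_filter_and_sort_paths all_paths_with_durations (filter_and_sort_paths all_paths_with_durations)

-- ===== LEMMAS AND PROOFS =====

-- the insert-loop building subs leaves absent keys alone …
theorem pv_getD_foldl_insert_not_mem (f : Int → PySem.Set (List Int)) (m : Int) :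
    ∀ (ks : List Int) (d : PySem.Dict Int (PySem.Set (List Int))), m ∉ ks →
      (ks.foldl (fun d k => d.insert k (f k)) d).getD m PySem.Set.empty
        = d.getD m PySem.Set.empty := by
  intro ks
  induction ks with
  | nil => intro d _; rfl
  | cons k tl ih =>
    intro d hm
    simp only [List.mem_cons, not_or] at hm
    simp only [List.foldl_cons, ih _ hm.2, PySem.Dict.getD_insert,
      if_neg hm.1]

-- … and maps every present key m to f m
theorem pv_getD_foldl_insert_mem (f : Int → PySem.Set (List Int)) (m : Int) :
    ∀ (ks : List Int) (d : PySem.Dict Int (PySem.Set (List Int))), m ∈ ks →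
      (ks.foldl (fun d k => d.insert k (f k)) d).getD m PySem.Set.empty = f m := by
  intro ks
  induction ks with
  | nil => intro d h; simp at h
  | cons k tl ih =>
    intro d hm
    by_cases htl : m ∈ tl
    · simp only [List.foldl_cons, ih _ htl]
    · have hk : m = k := by rcases List.mem_cons.1 hm with h | h; exact h; exact absurd h htl
      subst hk
      rw [List.foldl_cons, pv_getD_foldl_insert_not_mem f m tl _ htl,
        PySem.Dict.getD_insert_self]

-- generic membership through a set-building fold whose step's membership is characterised pointwise
theorem pv_mem_foldl {β : Type} (P : β → List Int → Prop)
    (F : PySem.Set (List Int) → β → PySem.Set (List Int))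
    (h : ∀ s b y, y ∈ F s b ↔ y ∈ s ∨ P b y) :
    ∀ (l : List β) (s : PySem.Set (List Int)) (y : List Int),
      y ∈ l.foldl F s ↔ y ∈ s ∨ ∃ b ∈ l, P b y := by
  intro l
  induction l with
  | nil => simp
  | cons hd tl ih =>
    intro s y
    simp only [List.foldl_cons, ih, h, List.mem_cons]
    constructor
    · rintro ((hs | hp) | ⟨b, hb, hpb⟩)
      · exact Or.inl hs
      · exact Or.inr ⟨hd, Or.inl rfl, hp⟩
      · exact Or.inr ⟨b, Or.inr hb, hpb⟩
    · rintro (hs | ⟨b, (rfl | hb), hpb⟩)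
      · exact Or.inl (Or.inl hs)
      · exact Or.inl (Or.inr hpb)
      · exact Or.inr ⟨b, hb, hpb⟩

theorem pv_mem_windows (paths : List (List Int)) (m : Int) (y : List Int) :
    y ∈ pvWindows paths m ↔ ∃ t ∈ paths, m < (t.length : Int) ∧
      ∃ i ∈ PySem.List.pyRange 0 ((t.length : Int) - m + 1) 1,
        y = PySem.List.slice t (some i) (some (i + m)) := by
  unfold pvWindows
  rw [pv_mem_foldl
      (P := fun t y => m < (t.length : Int) ∧
        ∃ i ∈ PySem.List.pyRange 0 ((t.length : Int) - m + 1) 1,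
          y = PySem.List.slice t (some i) (some (i + m)))]
  · simp [PySem.Set.empty]
  · intro s t y
    split
    · rename_i hlt
      rw [pv_mem_foldl (P := fun i y => y = PySem.List.slice t (some i) (some (i + m)))]
      · tauto
      · intro s i y
        rw [PySem.Set.mem_add]
    · rename_i hlt
      tauto

-- per-path: A's (path != other) && is_sub_path test ↔ B's window witness
theorem pv_per_path (p o : List Int) :
    (decide (p ≠ o) && pvIsSubPath p o) = true ↔
      ((p.length : Int) < (o.length : Int) ∧
        ∃ i ∈ PySem.List.pyRange 0 ((o.length : Int) - (p.length : Int) + 1) 1,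
          p = PySem.List.slice o (some i) (some (i + (p.length : Int)))) := by
  constructor
  · rintro h
    simp only [Bool.and_eq_true, decide_eq_true_eq] at h
    obtain ⟨hne, hsub⟩ := h
    unfold pvIsSubPath at hsub
    split at hsub
    · exact absurd hsub (by simp)
    · rename_i hlen
      simp only [List.any_eq_true, beq_iff_eq] at hsub
      obtain ⟨i, hi, hsl⟩ := hsub
      exact ⟨by omega, i, hi, hsl.symm⟩
  · rintro ⟨hlt, i, hi, hp⟩
    have hne : p ≠ o := by
      intro h; rw [h] at hlt; omega
    simp only [Bool.and_eq_true, decide_eq_true_eq]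
    refine ⟨hne, ?_⟩
    unfold pvIsSubPath
    split
    · omega
    · simp only [List.any_eq_true, beq_iff_eq]
      exact ⟨i, hi, hp.symm⟩

-- A's keep-test equals B's per-length set lookup, as Bools, for any path of the list
theorem pv_pred_eq (l : List (List Int × Int)) (pd : List Int × Int) (hpd : pd ∈ l) :
    (l.map (fun pd => pd.1)).any (fun other_path =>
        decide (pd.1 ≠ other_path) && pvIsSubPath pd.1 other_path)
      = PySem.Set.contains
          (((PySem.Set.ofList ((l.map (fun pd => pd.1)).map (fun t => (t.length : Int)))).foldl
              (fun d m => d.insert m (pvWindows (l.map (fun pd => pd.1)) m))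
              PySem.Dict.empty).getD ((pd.1.length : Int)) PySem.Set.empty)
          pd.1 := by
  have hmem : ((pd.1.length : Int)) ∈
      PySem.Set.ofList ((l.map (fun pd => pd.1)).map (fun t => (t.length : Int))) := by
    rw [PySem.Set.mem_ofList]
    exact List.mem_map.2 ⟨pd.1, List.mem_map.2 ⟨pd, hpd, rfl⟩, rfl⟩
  rw [pv_getD_foldl_insert_mem _ _ _ _ hmem]
  rw [Bool.eq_iff_iff, List.any_eq_true, PySem.Set.contains_iff, pv_mem_windows]
  constructor
  · rintro ⟨o, ho, h⟩
    rw [List.mem_map] at ho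
    obtain ⟨qd, hqd, rfl⟩ := ho
    obtain ⟨h1, h2⟩ := (pv_per_path pd.1 qd.1).1 h
    exact ⟨qd.1, List.mem_map.2 ⟨qd, hqd, rfl⟩, h1, h2⟩
  · rintro ⟨t, ht, h1, h2⟩
    exact ⟨t, ht, (pv_per_path pd.1 t).2 ⟨h1, h2⟩⟩

-- ===== VERDICT (by name: the statement is the Claim_ definition above) =====
theorem filter_and_sort_paths_spec : Claim_equal_filter_and_sort_paths := by
  intro l _
  unfold Spec_filter_and_sort_paths filter_and_sort_paths filter_and_sort_paths_alt
  dsimp only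
  rw [PySem.List.foldl_append_if_eq_filter]
  simp only [List.nil_append]
  congr 1
  apply List.filter_congr
  intro pd hpd
  rw [pv_pred_eq l pd hpd]
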